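-- pv_equiv track=rewrite | github.com/salokr/Email-Event-Extraction | utils/seq_labeling_argument_loader.py | append_tags
-- ===== SOURCE A (Python) =====
-- def append_tags(sentence, trigger):
--     indices = trigger['indices']
--     new_sen = sentence
--     try:
--         indices.remove("")
--     except:
--         pass
--     if(len(indices)>0):
--         #indices = [int(idx) for idx in indices]
--         i = 1
--         prev_i = 0
--         new_sen = sentence[:indices[0]] + ['[TRG]']
--         while(i<len(indices)):
--             if(not indices[i]-1 == indices[i-1]):
--                 new_sen += sentence[indices[prev_i]: indices[i-1] + 1] + ['[/TRG]'] + sentence[indices[i-1] + 1: indices[i]] + ['[TRG]']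
--                 prev_i = i
--             i += 1
--         new_sen += sentence[indices[prev_i]: indices[i-1] + 1] + ['[/TRG]'] + sentence[indices[i-1] + 1: ]
--     return new_sen
-- ===== SOURCE B (Python) =====
-- def append_tags(sentence, trigger):
--     indices = trigger['indices']
--     try:
--         indices.remove("")
--     except ValueError:
--         pass
--     if not indices:
--         return sentence
--     # one pass: group indices into maximal contiguous runs (start_value, end_value)
--     runs = []
--     start = prev = indices[0]
--     for x in indices[1:]:
--         if x != prev + 1:
--             runs.append((start, prev))
--             start = x
--         prev = x
--     runs.append((start, prev))
--     # second pass: stitch the output from prefix, tagged runs and gap slices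
--     out = sentence[:runs[0][0]]
--     for k, (s, e) in enumerate(runs):
--         out += ['[TRG]'] + sentence[s:e + 1] + ['[/TRG]']
--         if k + 1 < len(runs):
--             out += sentence[e + 1:runs[k + 1][0]]
--         else:
--             out += sentence[e + 1:]
--     return out
-- ===== Notes on version B (the rewrite author's own statement) =====
-- stated objective: alternative
-- what changed: A's single index-juggling while loop (tracking i/prev_i positions into indices) is replaced by a two-phase decomposition: one pass groups indices into maximal contiguous runs as (start,end) value pairs, a second pass stitches the output from the prefix slice, tagged run slices and gap slices.
-- outside the precondition, e.g. on append_tags(['a', 'b'], {}): A raises KeyError, B raises KeyError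
import Mathlib
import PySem

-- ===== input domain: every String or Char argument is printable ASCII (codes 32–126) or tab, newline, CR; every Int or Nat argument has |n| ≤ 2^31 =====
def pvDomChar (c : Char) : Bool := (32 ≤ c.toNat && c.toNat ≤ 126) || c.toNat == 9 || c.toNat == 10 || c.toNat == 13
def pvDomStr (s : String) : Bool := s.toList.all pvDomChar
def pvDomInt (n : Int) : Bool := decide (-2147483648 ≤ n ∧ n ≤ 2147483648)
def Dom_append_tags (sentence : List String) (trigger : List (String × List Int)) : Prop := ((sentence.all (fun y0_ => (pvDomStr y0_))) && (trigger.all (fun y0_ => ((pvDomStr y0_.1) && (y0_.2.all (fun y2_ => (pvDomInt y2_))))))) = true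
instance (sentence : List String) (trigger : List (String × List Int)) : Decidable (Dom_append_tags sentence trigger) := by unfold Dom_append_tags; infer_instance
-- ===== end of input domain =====

-- B replaces A's single index-juggling while loop by a two-phase decomposition (group indices
-- into contiguous runs, then emit prefix/tagged-run/gap slices); objective: alternative, not faster.
-- (A's `indices.remove("")` can never fire on a list of ints — it raises ValueError, caught —
-- so neither program observably mutates its argument on the typed domain.)

-- ===== PORT A =====
-- A's while loop: state (i, prev_i, new_sen); `indices.remove("")` is a no-op on List Int
-- (ValueError caught by the bare except), so it is not ported.
def append_tags_go (sentence : List String) (indices : List Int) (i prev_i : Nat)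
    (new_sen : List String) : List String :=
  if h : i < indices.length then
    if ¬ (indices.getD i 0 - 1 = indices.getD (i-1) 0) then
      append_tags_go sentence indices (i+1) i
        (new_sen ++ PySem.List.slice sentence (some (indices.getD prev_i 0)) (some (indices.getD (i-1) 0 + 1))
          ++ ["[/TRG]"] ++ PySem.List.slice sentence (some (indices.getD (i-1) 0 + 1)) (some (indices.getD i 0))
          ++ ["[TRG]"])
    else
      append_tags_go sentence indices (i+1) prev_i new_sen
  else
    new_sen ++ PySem.List.slice sentence (some (indices.getD prev_i 0)) (some (indices.getD (i-1) 0 + 1))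
      ++ ["[/TRG]"] ++ PySem.List.slice sentence (some (indices.getD (i-1) 0 + 1)) none
termination_by indices.length - i

def append_tags (sentence : List String) (trigger : List (String × List Int)) : List String :=
  match (PySem.Dict.mk trigger).get? "indices" with
  | none => sentence          -- Python raises KeyError here; excluded by Pre_
  | some indices =>
    if 0 < indices.length then
      append_tags_go sentence indices 1 0
        (PySem.List.slice sentence none (some (indices.getD 0 0)) ++ ["[TRG]"])
    else sentence

-- ===== PORT B =====
-- one pass: maximal contiguous runs as (start_value, end_value)
def append_tags_runs (start prev : Int) : List Int → List (Int × Int)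
  | [] => [(start, prev)]
  | x :: rest =>
    if x ≠ prev + 1 then (start, prev) :: append_tags_runs x x rest
    else append_tags_runs start x rest

-- second pass: tagged run bodies with their gap (or tail) slices
def append_tags_emit (sentence : List String) : List (Int × Int) → List String
  | [] => []
  | (s, e) :: rest =>
    ["[TRG]"] ++ PySem.List.slice sentence (some s) (some (e + 1)) ++ ["[/TRG]"] ++
    (match rest with
     | [] => PySem.List.slice sentence (some (e + 1)) none
     | (s2, _) :: _ => PySem.List.slice sentence (some (e + 1)) (some s2)) ++
    append_tags_emit sentence rest

def append_tags_alt (sentence : List String) (trigger : List (String × List Int)) : List String :=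
  match (PySem.Dict.mk trigger).get? "indices" with
  | none => sentence          -- Python raises KeyError here; excluded by Pre_
  | some indices =>
    match indices with
    | [] => sentence
    | x :: rest =>
      let runs := append_tags_runs x x rest
      PySem.List.slice sentence none (some ((runs.headD (0, 0)).1)) ++ append_tags_emit sentence runs

-- ===== PRECONDITION & SPEC =====
-- Pre_ excludes exactly the inputs where Python A raises KeyError: trigger lacks the key "indices".
def Pre_append_tags (sentence : List String) (trigger : List (String × List Int)) : Prop :=
  ((PySem.Dict.mk trigger).get? "indices").isSome = true
instance (sentence : List String) (trigger : List (String × List Int)) : Decidable (Pre_append_tags sentence trigger) := by unfold Pre_append_tags; infer_instance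

def pvWitness_append_tags : List String × (List (String × List Int)) :=
  (["a", "b", "c"], [("indices", [1])])

def Spec_append_tags (sentence : List String) (trigger : List (String × List Int)) (out : List String) : Prop := out = append_tags_alt sentence trigger
instance (sentence : List String) (trigger : List (String × List Int)) (out : List String) : Decidable (Spec_append_tags sentence trigger out) := by unfold Spec_append_tags; infer_instance

-- ===== CLAIM (what is proved, stated in full; the proofs are below) =====
def Claim_equal_append_tags : Prop := ∀ (sentence : List String) (trigger : List (String × List Int)), Dom_append_tags sentence trigger → Pre_append_tags sentence trigger → Spec_append_tags sentence trigger (append_tags sentence trigger)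

-- ===== LEMMAS AND PROOFS =====

-- the tail of A's computation, phrased over the remaining index list with the current
-- run-start value s and previous value p abstracted out
def tailEmit (sentence : List String) (s p : Int) : List Int → List String
  | [] => PySem.List.slice sentence (some s) (some (p + 1)) ++ ["[/TRG]"] ++
          PySem.List.slice sentence (some (p + 1)) none
  | x :: rest =>
    if ¬ (x - 1 = p) then
      PySem.List.slice sentence (some s) (some (p + 1)) ++ ["[/TRG]"] ++
      PySem.List.slice sentence (some (p + 1)) (some x) ++ ["[TRG]"] ++
      tailEmit sentence x x rest
    else tailEmit sentence s x rest

theorem runs_head_start (zs : List Int) (s p : Int) :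
    ((append_tags_runs s p zs).headD (0, 0)).1 = s := by
  induction zs generalizing p with
  | nil => simp [append_tags_runs]
  | cons x rest ih =>
    simp only [append_tags_runs]
    split
    · simp
    · exact ih x

theorem runs_ne_nil (zs : List Int) (s p : Int) : append_tags_runs s p zs ≠ [] := by
  induction zs generalizing s p with
  | nil => simp [append_tags_runs]
  | cons x rest ih =>
    simp only [append_tags_runs]
    split
    · simp
    · exact ih s x

theorem emit_cons₂ (sentence : List String) (s e s2 e2 : Int) (r : List (Int × Int)) :
    append_tags_emit sentence ((s, e) :: (s2, e2) :: r) =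
      ["[TRG]"] ++ PySem.List.slice sentence (some s) (some (e + 1)) ++ ["[/TRG]"] ++
      PySem.List.slice sentence (some (e + 1)) (some s2) ++
      append_tags_emit sentence ((s2, e2) :: r) := rfl

theorem emit_eq_tailEmit (sentence : List String) (zs : List Int) (s p : Int) :
    append_tags_emit sentence (append_tags_runs s p zs) =
      ["[TRG]"] ++ tailEmit sentence s p zs := by
  induction zs generalizing s p with
  | nil => simp [append_tags_runs, append_tags_emit, tailEmit]
  | cons x rest ih =>
    simp only [append_tags_runs, tailEmit]
    by_cases h : x - 1 = p
    · have hx : ¬ x ≠ p + 1 := by omega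
      simp only [if_neg hx, if_neg (by omega : ¬ ¬ (x - 1 = p))]
      exact ih s x
    · have hx : x ≠ p + 1 := by omega
      simp only [if_pos hx, if_pos (by omega : ¬ (x - 1 = p))]
      rcases hr : append_tags_runs x x rest with _ | ⟨⟨s2, e2⟩, rest'⟩
      · exact absurd hr (runs_ne_nil rest x x)
      · have hs2 : s2 = x := by
          have := runs_head_start rest x x
          rw [hr] at this; simpa using this
        subst hs2
        rw [emit_cons₂, ← hr, ih s2 s2]
        simp

theorem go_eq_tailEmit (sentence : List String) (indices : List Int) :
    ∀ (tail : List Int) (i prev_i : Nat) (acc : List String),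
      i ≤ indices.length → indices.drop i = tail →
      append_tags_go sentence indices i prev_i acc =
        acc ++ tailEmit sentence (indices.getD prev_i 0) (indices.getD (i-1) 0) tail := by
  intro tail
  induction tail with
  | nil =>
    intro i prev_i acc hle hdrop
    have hlen : indices.length ≤ i := by
      by_contra h
      have := List.drop_eq_getElem_cons (by omega : i < indices.length)
      rw [hdrop] at this; exact (List.cons_ne_nil _ _) this.symm
    rw [append_tags_go]
    simp only [dif_neg (by omega : ¬ i < indices.length)]
    simp [tailEmit]
  | cons x rest ih =>
    intro i prev_i acc hle hdrop
    have hi : i < indices.length := by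
      by_contra h
      rw [List.drop_eq_nil_of_le (by omega)] at hdrop
      exact (List.cons_ne_nil _ _) hdrop.symm
    have h2 := List.drop_eq_getElem_cons hi
    rw [hdrop] at h2
    injection h2 with h1 h3
    have hx : indices.getD i 0 = x := by
      simp [List.getD, List.getElem?_eq_getElem hi, ← h1]
    have hrest : indices.drop (i+1) = rest := h3.symm
    rw [append_tags_go]
    simp only [dif_pos hi, hx]
    by_cases h : x - 1 = indices.getD (i-1) 0
    · simp only [if_neg (by omega : ¬ ¬ (x - 1 = indices.getD (i-1) 0))]
      rw [ih (i+1) prev_i acc (by omega) hrest]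
      have h4 : (i + 1 - 1) = i := by omega
      rw [h4, hx]
      simp only [tailEmit, if_neg (by omega : ¬ ¬ (x - 1 = indices.getD (i-1) 0))]
    · simp only [if_pos (by omega : ¬ (x - 1 = indices.getD (i-1) 0))]
      rw [ih (i+1) i _ (by omega) hrest]
      have h4 : (i + 1 - 1) = i := by omega
      rw [h4, hx]
      simp only [tailEmit, if_pos (by omega : ¬ (x - 1 = indices.getD (i-1) 0))]
      simp

-- ===== VERDICT (by name: the statement is the Claim_ definition above) =====
theorem append_tags_spec : Claim_equal_append_tags := by
  intro sentence trigger _ hpre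
  unfold Spec_append_tags append_tags append_tags_alt
  rcases hget : (PySem.Dict.mk trigger).get? "indices" with _ | indices
  · rfl
  rcases indices with _ | ⟨x, rest⟩
  · simp
  simp only [List.length_cons, Nat.succ_pos, if_pos]
  rw [go_eq_tailEmit sentence (x :: rest) rest 1 0
    (PySem.List.slice sentence none (some ((x :: rest).getD 0 0)) ++ ["[TRG]"])
    (by simp) (by simp)]
  rw [runs_head_start, emit_eq_tailEmit]
  simp
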